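-- pv_equiv track=rewrite | github.com/Parthi10/hackerrank | hackerrank_contests/w33/passes6.py | longest_pal
-- ===== SOURCE A (Python) =====
-- def two_pal(a,b, k_list):
--     if a == b:
--         return True
--     for i in k_list:
--         if a in i:
--             if b in i:
--                 return True
--             else:
--                 return False
--         elif b in i:
--             if a in i:
--                 return True
--             else:
--                 return False
--     return False
--
-- def longest_pal(a, m, k_list):
--     mat = [[0 for x in range(m)] for y in range(m)]
--     for x in range(m):
--         mat[x][x] = 1
--
--     for l in range(2, m+1):
--         for i in range(m-l+1):
--             j = i + l - 1
--             if l==2 and two_pal(a[i], a[j], k_list):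
--                 mat[i][j] = 2
--             elif two_pal(a[i],a[j], k_list):
--                 mat[i][j] = 2 + mat[i+1][j-1]
--             else:
--                 mat[i][j] = max(mat[i][j-1], mat[i+1][j])
--
--     return mat[0][m-1]
-- ===== SOURCE B (Python) =====
-- def two_pal(a,b, k_list):
--     if a == b:
--         return True
--     for i in k_list:
--         if a in i:
--             if b in i:
--                 return True
--             else:
--                 return False
--         elif b in i:
--             if a in i:
--                 return True
--             else:
--                 return False
--     return False
--
-- def longest_pal(a, m, k_list):
--     memo = {}
--     def solve(i, j):
--         if i > j:
--             return 0
--         if i == j: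
--             return 1
--         if (i, j) in memo:
--             return memo[(i, j)]
--         if two_pal(a[i], a[j], k_list):
--             r = 2 + solve(i + 1, j - 1)
--         else:
--             r = max(solve(i + 1, j), solve(i, j - 1))
--         memo[(i, j)] = r
--         return r
--     vals = []
--     for j in range(m):
--         vals.append(solve(0, j))
--     return vals[m - 1]
-- ===== Notes on version B (the rewrite author's own statement) =====
-- stated objective: alternative
-- what changed: longest_pal is rewritten as top-down recursion from the outer endpoints with a dict memo (solve(i,j) cached) instead of A's bottom-up length-by-length sweep filling an m x m matrix.
import Mathlib
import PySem

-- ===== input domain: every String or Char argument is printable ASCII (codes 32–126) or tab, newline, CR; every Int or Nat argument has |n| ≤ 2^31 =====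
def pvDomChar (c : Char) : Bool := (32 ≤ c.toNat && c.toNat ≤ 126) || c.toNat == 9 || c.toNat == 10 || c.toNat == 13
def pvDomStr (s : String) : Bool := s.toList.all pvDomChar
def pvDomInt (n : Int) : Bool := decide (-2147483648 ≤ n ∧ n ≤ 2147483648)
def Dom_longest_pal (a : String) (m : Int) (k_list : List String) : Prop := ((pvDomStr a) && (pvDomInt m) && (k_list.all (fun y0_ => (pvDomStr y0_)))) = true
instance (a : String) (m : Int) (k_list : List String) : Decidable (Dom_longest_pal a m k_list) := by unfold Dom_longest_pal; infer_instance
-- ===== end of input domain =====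

-- B replaces A's bottom-up length-sweep DP matrix by top-down memoized recursion from the
-- outer endpoints (same O(m^2) values; objective: alternative decomposition, not speed).


-- ===== PORT A =====
-- two_pal: shared helper of the Python module, used verbatim by A and by B.
def twoPalLoop (x y : Char) : List String → Bool
  | [] => false
  | g :: rest =>
    if PySem.Chars.isIn [x] g.toList then
      (if PySem.Chars.isIn [y] g.toList then true else false)
    else if PySem.Chars.isIn [y] g.toList then
      (if PySem.Chars.isIn [x] g.toList then true else false)
    else twoPalLoop x y rest

def twoPal (x y : Char) (k_list : List String) : Bool :=
  if x == y then true else twoPalLoop x y k_list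

-- a[i] is total-ported as pyGetD with a dummy default; Pre_ keeps every access in range.
def longest_pal (a : String) (m : Int) (k_list : List String) : Int :=
  let chars := a.toList
  let mat : List (List Int) :=
    (PySem.List.pyRange 0 m 1).map (fun _ => (PySem.List.pyRange 0 m 1).map (fun _ => (0:Int)))
  let mat := (PySem.List.pyRange 0 m 1).foldl
      (fun mat x => PySem.List.pySetD mat x (PySem.List.pySetD (PySem.List.pyGetD mat x []) x 1)) mat
  let mat := (PySem.List.pyRange 2 (m+1) 1).foldl (fun mat l =>
      (PySem.List.pyRange 0 (m - l + 1) 1).foldl (fun mat i =>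
        let j := i + l - 1
        if l == 2 && twoPal (PySem.List.pyGetD chars i ' ') (PySem.List.pyGetD chars j ' ') k_list then
          PySem.List.pySetD mat i (PySem.List.pySetD (PySem.List.pyGetD mat i []) j 2)
        else if twoPal (PySem.List.pyGetD chars i ' ') (PySem.List.pyGetD chars j ' ') k_list then
          PySem.List.pySetD mat i (PySem.List.pySetD (PySem.List.pyGetD mat i []) j
            (2 + PySem.List.pyGetD (PySem.List.pyGetD mat (i+1) []) (j-1) 0))
        else
          PySem.List.pySetD mat i (PySem.List.pySetD (PySem.List.pyGetD mat i []) j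
            (max (PySem.List.pyGetD (PySem.List.pyGetD mat i []) (j-1) 0)
                 (PySem.List.pyGetD (PySem.List.pyGetD mat (i+1) []) j 0)))
      ) mat) mat
  PySem.List.pyGetD (PySem.List.pyGetD mat 0 []) (m-1) 0

-- ===== PORT B =====
-- solve(i, j) with the memo dict threaded through; returns (value, memo).
def solveB (chars : List Char) (kl : List String) (i j : Int)
    (memo : PySem.Dict (Int × Int) Int) : Int × PySem.Dict (Int × Int) Int :=
  if _h1 : i > j then (0, memo)
  else if _h2 : i = j then (1, memo)
  else
    match memo.get? (i, j) with
    | some v => (v, memo)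
    | none =>
      if twoPal (PySem.List.pyGetD chars i ' ') (PySem.List.pyGetD chars j ' ') kl then
        let p := solveB chars kl (i+1) (j-1) memo
        let r := 2 + p.1
        (r, p.2.insert (i, j) r)
      else
        let p1 := solveB chars kl (i+1) j memo
        let p2 := solveB chars kl i (j-1) p1.2
        let r := max p1.1 p2.1
        (r, p2.2.insert (i, j) r)
termination_by (j - i).toNat
decreasing_by all_goals omega

-- vals[m-1] is total-ported as pyGetD with default 0; Pre_ keeps the index in range.
def longest_pal_alt (a : String) (m : Int) (k_list : List String) : Int :=
  let vals := (PySem.List.pyRange 0 m 1).foldl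
    (fun (acc : List Int × PySem.Dict (Int × Int) Int) j =>
      (acc.1 ++ [(solveB a.toList k_list 0 j acc.2).1], (solveB a.toList k_list 0 j acc.2).2))
    ([], PySem.Dict.empty)
  PySem.List.pyGetD vals.1 (m-1) 0

-- ===== PRECONDITION & SPEC =====
-- Pre_ is exactly the set of inputs where Python A returns: m = 1 (no character is read),
-- or 2 ≤ m ≤ len(a); for m ≤ 0 mat[0] raises IndexError, for 2 ≤ m > len(a) a[j] raises IndexError.
def Pre_longest_pal (a : String) (m : Int) (k_list : List String) : Prop :=
  m = 1 ∨ (2 ≤ m ∧ m ≤ (a.toList.length : Int))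
instance (a : String) (m : Int) (k_list : List String) : Decidable (Pre_longest_pal a m k_list) := by
  unfold Pre_longest_pal; infer_instance

def pvWitness_longest_pal : String × Int × List String := ("abca", 4, ["bc"])

def Spec_longest_pal (a : String) (m : Int) (k_list : List String) (out : Int) : Prop := out = longest_pal_alt a m k_list
instance (a : String) (m : Int) (k_list : List String) (out : Int) : Decidable (Spec_longest_pal a m k_list out) := by unfold Spec_longest_pal; infer_instance

-- ===== CLAIM (what is proved, stated in full; the proofs are below) =====
def Claim_equal_longest_pal : Prop := ∀ (a : String) (m : Int) (k_list : List String), Dom_longest_pal a m k_list → Pre_longest_pal a m k_list → Spec_longest_pal a m k_list (longest_pal a m k_list)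

-- ===== LEMMAS AND PROOFS =====

-- The pure recurrence both programs compute.
def LP (chars : List Char) (kl : List String) (i j : Int) : Int :=
  if _h1 : i > j then 0
  else if _h2 : i = j then 1
  else if twoPal (PySem.List.pyGetD chars i ' ') (PySem.List.pyGetD chars j ' ') kl then
    2 + LP chars kl (i+1) (j-1)
  else
    max (LP chars kl (i+1) j) (LP chars kl i (j-1))
termination_by (j - i).toNat
decreasing_by all_goals omega

theorem LP_gt (chars : List Char) (kl : List String) {i j : Int} (h : i > j) :
    LP chars kl i j = 0 := by rw [LP, dif_pos h]

theorem LP_diag (chars : List Char) (kl : List String) {i j : Int} (h1 : ¬ i > j) (h2 : i = j) :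
    LP chars kl i j = 1 := by rw [LP, dif_neg h1, dif_pos h2]

theorem LP_rec (chars : List Char) (kl : List String) {i j : Int} (h1 : ¬ i > j) (h2 : ¬ i = j) :
    LP chars kl i j =
      if twoPal (PySem.List.pyGetD chars i ' ') (PySem.List.pyGetD chars j ' ') kl then
        2 + LP chars kl (i+1) (j-1)
      else max (LP chars kl (i+1) j) (LP chars kl i (j-1)) := by
  rw [LP, dif_neg h1, dif_neg h2]

def MemoOK (chars : List Char) (kl : List String) (memo : PySem.Dict (Int × Int) Int) : Prop :=
  ∀ p v, memo.get? p = some v → v = LP chars kl p.1 p.2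

theorem solveB_ok (chars : List Char) (kl : List String) :
    ∀ n : Nat, ∀ i j : Int, (j - i).toNat ≤ n → ∀ memo, MemoOK chars kl memo →
      (solveB chars kl i j memo).1 = LP chars kl i j ∧
      MemoOK chars kl (solveB chars kl i j memo).2 := by
  intro n
  induction n with
  | zero =>
    intro i j hn memo hmem
    by_cases h1 : i > j
    · rw [solveB, dif_pos h1]
      exact ⟨(LP_gt chars kl h1).symm, hmem⟩
    · have h2 : i = j := by omega
      rw [solveB, dif_neg h1, dif_pos h2]
      exact ⟨(LP_diag chars kl h1 h2).symm, hmem⟩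
  | succ n ih =>
    intro i j hn memo hmem
    by_cases h1 : i > j
    · rw [solveB, dif_pos h1]
      exact ⟨(LP_gt chars kl h1).symm, hmem⟩
    · by_cases h2 : i = j
      · rw [solveB, dif_neg h1, dif_pos h2]
        exact ⟨(LP_diag chars kl h1 h2).symm, hmem⟩
      · rw [solveB, dif_neg h1, dif_neg h2]
        cases hget : memo.get? (i, j) with
        | some v =>
          exact ⟨hmem (i, j) v hget, hmem⟩
        | none =>
          by_cases htp : twoPal (PySem.List.pyGetD chars i ' ') (PySem.List.pyGetD chars j ' ') kl = true
          · rw [if_pos htp]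
            obtain ⟨hv, hm⟩ := ih (i+1) (j-1) (by omega) memo hmem
            dsimp only
            constructor
            · rw [hv, LP_rec chars kl h1 h2, if_pos htp]
            · intro p v hpv
              rw [PySem.Dict.get?_insert] at hpv
              by_cases hp : p = (i, j)
              · rw [if_pos hp] at hpv
                cases hpv
                subst hp
                show 2 + (solveB chars kl (i+1) (j-1) memo).1 = LP chars kl i j
                rw [hv, LP_rec chars kl h1 h2, if_pos htp]
              · rw [if_neg hp] at hpv
                exact hm p v hpv
          · rw [if_neg htp]
            obtain ⟨hv1, hm1⟩ := ih (i+1) j (by omega) memo hmem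
            obtain ⟨hv2, hm2⟩ := ih i (j-1) (by omega) _ hm1
            dsimp only
            constructor
            · rw [hv1, hv2, LP_rec chars kl h1 h2, if_neg htp]
            · intro p v hpv
              rw [PySem.Dict.get?_insert] at hpv
              by_cases hp : p = (i, j)
              · rw [if_pos hp] at hpv
                cases hpv
                subst hp
                show max (solveB chars kl (i+1) j memo).1
                    (solveB chars kl i (j-1) (solveB chars kl (i+1) j memo).2).1 = LP chars kl i j
                rw [hv1, hv2, LP_rec chars kl h1 h2, if_neg htp]
              · rw [if_neg hp] at hpv
                exact hm2 p v hpv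

theorem vals_fold (chars : List Char) (kl : List String) :
    ∀ xs : List Int, ∀ acc : List Int, ∀ memo, MemoOK chars kl memo →
    (xs.foldl
        (fun (acc : List Int × PySem.Dict (Int × Int) Int) j =>
          (acc.1 ++ [(solveB chars kl 0 j acc.2).1], (solveB chars kl 0 j acc.2).2))
        (acc, memo)).1
      = acc ++ xs.map (fun j => LP chars kl 0 j) := by
  intro xs
  induction xs with
  | nil => intro acc memo _; simp
  | cons j xs ih =>
    intro acc memo hmem
    obtain ⟨hv, hm⟩ := solveB_ok chars kl (j-0).toNat 0 j (le_refl _) memo hmem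
    simp only [List.foldl_cons, List.map_cons]
    rw [ih (acc ++ [(solveB chars kl 0 j memo).1]) _ hm, hv]
    simp

theorem alt_eq_LP (a : String) (m : Int) (k_list : List String) (hm : 1 ≤ m) :
    longest_pal_alt a m k_list = LP a.toList k_list 0 (m-1) := by
  show PySem.List.pyGetD
      ((PySem.List.pyRange 0 m 1).foldl
        (fun (acc : List Int × PySem.Dict (Int × Int) Int) j =>
          (acc.1 ++ [(solveB a.toList k_list 0 j acc.2).1], (solveB a.toList k_list 0 j acc.2).2))
        ([], PySem.Dict.empty)).1 (m-1) 0 = LP a.toList k_list 0 (m-1)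
  rw [vals_fold a.toList k_list (PySem.List.pyRange 0 m 1) [] PySem.Dict.empty
    (by intro p v hpv; simp [PySem.Dict.get?, PySem.Dict.empty] at hpv)]
  rw [List.nil_append,
    PySem.List.pyGetD_map_pyRange_of_nonneg _ m (m-1) 0 (by omega) (by omega)]

-- ---- A-side: the matrix sweep computes LP ----
def matU (mat : List (List Int)) (i j v : Int) : List (List Int) :=
  PySem.List.pySetD mat i (PySem.List.pySetD (PySem.List.pyGetD mat i []) j v)

def matG (mat : List (List Int)) (i j : Int) : Int :=
  PySem.List.pyGetD (PySem.List.pyGetD mat i []) j 0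

def Shape (mat : List (List Int)) (n : Nat) : Prop :=
  mat.length = n ∧ ∀ r ∈ mat, r.length = n

def stepA (chars : List Char) (kl : List String) (l : Int) (mat : List (List Int)) (i : Int) :
    List (List Int) :=
  let j := i + l - 1
  if l == 2 && twoPal (PySem.List.pyGetD chars i ' ') (PySem.List.pyGetD chars j ' ') kl then
    matU mat i j 2
  else if twoPal (PySem.List.pyGetD chars i ' ') (PySem.List.pyGetD chars j ' ') kl then
    matU mat i j (2 + matG mat (i+1) (j-1))
  else
    matU mat i j (max (matG mat i (j-1)) (matG mat (i+1) j))

def outerA (chars : List Char) (kl : List String) (m : Int) (mat : List (List Int)) (l : Int) :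
    List (List Int) :=
  (PySem.List.pyRange 0 (m - l + 1) 1).foldl (stepA chars kl l) mat

theorem matU_shape {mat : List (List Int)} {n : Nat} (h : Shape mat n) {i : Int} (j v : Int)
    (hi0 : 0 ≤ i) (hi : i < (n : Int)) : Shape (matU mat i j v) n := by
  obtain ⟨hlen, hrows⟩ := h
  unfold matU
  rw [PySem.List.pySetD_of_nonneg mat _ hi0]
  refine ⟨by rw [List.length_set, hlen], ?_⟩
  intro r hr
  rcases List.mem_or_eq_of_mem_set hr with hr' | hr'
  · exact hrows r hr'
  · subst hr'
    rw [PySem.List.length_pySetD]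
    have hilen : i < (mat.length : Int) := by omega
    rw [PySem.List.pyGetD_eq_getElem mat [] hi0 hilen]
    exact hrows _ (List.getElem_mem _)

theorem matG_matU {mat : List (List Int)} {n : Nat} (h : Shape mat n) {i j i' j' : Int} (v : Int)
    (hi0 : 0 ≤ i) (hi : i < (n : Int)) (hj0 : 0 ≤ j) (_hj : j < (n : Int))
    (hi'0 : 0 ≤ i') (hi' : i' < (n : Int)) (hj'0 : 0 ≤ j') (hj' : j' < (n : Int)) :
    matG (matU mat i j v) i' j' = if i' = i ∧ j' = j then v else matG mat i' j' := by
  obtain ⟨hlen, hrows⟩ := h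
  have hilen : i < (mat.length : Int) := by omega
  have hi'len : i' < (mat.length : Int) := by omega
  have hrow : PySem.List.pyGetD mat i [] = mat[i.toNat]'(by omega) :=
    PySem.List.pyGetD_eq_getElem mat [] hi0 hilen
  have hrlen : (mat[i.toNat]'(by omega)).length = n := hrows _ (List.getElem_mem _)
  unfold matU matG
  rw [PySem.List.pySetD_of_nonneg mat _ hi0, hrow, PySem.List.pySetD_of_nonneg _ _ hj0]
  have hsetlen : (mat.set i.toNat ((mat[i.toNat]'(by omega)).set j.toNat v)).length = mat.length :=
    List.length_set
  have hout : PySem.List.pyGetD (mat.set i.toNat ((mat[i.toNat]'(by omega)).set j.toNat v)) i' []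
      = (mat.set i.toNat ((mat[i.toNat]'(by omega)).set j.toNat v))[i'.toNat]'(by omega) :=
    PySem.List.pyGetD_eq_getElem _ [] hi'0 (by rw [hsetlen]; omega)
  rw [hout, List.getElem_set]
  by_cases hii : i' = i
  · have : i.toNat = i'.toNat := by omega
    rw [if_pos this]
    have hrlen2 : ((mat[i.toNat]'(by omega)).set j.toNat v).length = n := by
      rw [List.length_set, hrlen]
    have hin : PySem.List.pyGetD ((mat[i.toNat]'(by omega)).set j.toNat v) j' 0
        = ((mat[i.toNat]'(by omega)).set j.toNat v)[j'.toNat]'(by omega) :=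
      PySem.List.pyGetD_eq_getElem _ 0 hj'0 (by rw [hrlen2]; omega)
    rw [hin, List.getElem_set]
    by_cases hjj : j' = j
    · have hjj' : j.toNat = j'.toNat := by omega
      rw [if_pos hjj', if_pos ⟨hii, hjj⟩]
    · have hjj' : ¬ j.toNat = j'.toNat := by omega
      rw [if_neg hjj', if_neg (by tauto)]
      subst hii
      rw [PySem.List.pyGetD_eq_getElem mat [] hi0 hilen,
        PySem.List.pyGetD_eq_getElem _ 0 hj'0 (by rw [hrlen]; omega)]
  · have : ¬ i.toNat = i'.toNat := by omega
    rw [if_neg this, if_neg (by tauto)]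
    rw [PySem.List.pyGetD_eq_getElem mat [] hi'0 hi'len]

theorem diag_fold (n : Nat) (xs : List Int) : ∀ mat, Shape mat n →
    (∀ x ∈ xs, 0 ≤ x ∧ x < (n : Int)) →
    Shape (xs.foldl (fun mat x => matU mat x x 1) mat) n ∧
    ∀ i j : Int, 0 ≤ i → i < (n : Int) → 0 ≤ j → j < (n : Int) →
      matG (xs.foldl (fun mat x => matU mat x x 1) mat) i j =
        if i = j ∧ i ∈ xs then 1 else matG mat i j := by
  induction xs with
  | nil =>
    intro mat hsh _
    refine ⟨hsh, ?_⟩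
    intro i j _ _ _ _
    simp
  | cons x xs ih =>
    intro mat hsh hmem
    obtain ⟨hx0, hxn⟩ := hmem x List.mem_cons_self
    have hsh' := matU_shape hsh x 1 hx0 hxn
    obtain ⟨ihsh, ihval⟩ := ih (matU mat x x 1) hsh' (fun y hy => hmem y (List.mem_cons_of_mem _ hy))
    refine ⟨by simpa using ihsh, ?_⟩
    intro i j hi0 hin hj0 hjn
    simp only [List.foldl_cons]
    rw [ihval i j hi0 hin hj0 hjn, matG_matU hsh 1 hx0 hxn hx0 hxn hi0 hin hj0 hjn]
    simp only [List.mem_cons]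
    by_cases h1 : i = j ∧ i ∈ xs
    · rw [if_pos h1, if_pos ⟨h1.1, Or.inr h1.2⟩]
    · rw [if_neg h1]
      by_cases h2 : i = x ∧ j = x
      · rw [if_pos h2, if_pos ⟨by omega, Or.inl h2.1⟩]
      · rw [if_neg h2, if_neg (by by_cases hij : i = j <;> simp_all)]

theorem inner_fold (chars : List Char) (kl : List String) (m l : Int) (n : Nat)
    (hn : (n : Int) = m) (hl2 : 2 ≤ l) (hlm : l ≤ m) :
    ∀ k : Nat, ∀ a : Int, 0 ≤ a → (m - l + 1 - a).toNat ≤ k → ∀ mat, Shape mat n →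
    (∀ i j : Int, 0 ≤ i → i ≤ j → j < m →
        (j - i + 1 ≤ l - 1 ∨ (j - i + 1 = l ∧ i < a)) → matG mat i j = LP chars kl i j) →
    Shape ((PySem.List.pyRange a (m-l+1) 1).foldl (stepA chars kl l) mat) n ∧
    (∀ i j : Int, 0 ≤ i → i ≤ j → j < m → j - i + 1 ≤ l →
        matG ((PySem.List.pyRange a (m-l+1) 1).foldl (stepA chars kl l) mat) i j
          = LP chars kl i j) := by
  intro k
  induction k with
  | zero =>
    intro a ha0 hfuel mat hsh hyp
    have hstop : m - l + 1 ≤ a := by omega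
    rw [PySem.List.pyRange_one_eq_nil hstop]
    refine ⟨hsh, ?_⟩
    intro i j hi0 hij hjm hlen
    rcases lt_or_ge (j - i + 1) l with hc | hc
    · exact hyp i j hi0 hij hjm (Or.inl (by omega))
    · exact hyp i j hi0 hij hjm (Or.inr ⟨by omega, by omega⟩)
  | succ k ih =>
    intro a ha0 hfuel mat hsh hyp
    by_cases hstop : m - l + 1 ≤ a
    · rw [PySem.List.pyRange_one_eq_nil hstop]
      refine ⟨hsh, ?_⟩
      intro i j hi0 hij hjm hlen
      rcases lt_or_ge (j - i + 1) l with hc | hc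
      · exact hyp i j hi0 hij hjm (Or.inl (by omega))
      · exact hyp i j hi0 hij hjm (Or.inr ⟨by omega, by omega⟩)
    · rw [PySem.List.pyRange_one_cons (by omega), List.foldl_cons]
      -- the written cell is (a, a+l-1)
      have hja : a < a + l - 1 := by omega
      have hjm : a + l - 1 < m := by omega
      have hval : stepA chars kl l mat a = matU mat a (a + l - 1)
          (if twoPal (PySem.List.pyGetD chars a ' ') (PySem.List.pyGetD chars (a+l-1) ' ') kl
           then (if l = 2 then 2 else 2 + matG mat (a+1) (a+l-1-1))
           else max (matG mat a (a+l-1-1)) (matG mat (a+1) (a+l-1))) := by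
        unfold stepA
        by_cases hl2' : l = 2
        · subst hl2'
          by_cases htp : twoPal (PySem.List.pyGetD chars a ' ') (PySem.List.pyGetD chars (a+2-1) ' ') kl = true
          · simp [htp]
          · simp [htp]
        · have hbe : (l == 2) = false := by simp [hl2']
          by_cases htp : twoPal (PySem.List.pyGetD chars a ' ') (PySem.List.pyGetD chars (a+l-1) ' ') kl = true
          · simp [hbe, htp, hl2']
          · simp [hbe, htp]
      have hLPa : LP chars kl a (a + l - 1) =
          if twoPal (PySem.List.pyGetD chars a ' ') (PySem.List.pyGetD chars (a+l-1) ' ') kl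
          then 2 + LP chars kl (a+1) (a+l-1-1)
          else max (LP chars kl (a+1) (a+l-1)) (LP chars kl a (a+l-1-1)) := by
        rw [LP_rec chars kl (by omega) (by omega)]
      have hshape' : Shape (stepA chars kl l mat a) n := by
        rw [hval]; exact matU_shape hsh _ _ ha0 (by omega)
      have hyp' : ∀ i j : Int, 0 ≤ i → i ≤ j → j < m →
          (j - i + 1 ≤ l - 1 ∨ (j - i + 1 = l ∧ i < a + 1)) →
          matG (stepA chars kl l mat a) i j = LP chars kl i j := by
        intro i j hi0 hij hjm' hcond
        rw [hval, matG_matU hsh _ ha0 (by omega) (by omega) (by omega) hi0 (by omega) (by omega) (by omega)]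
        by_cases hcell : i = a ∧ j = a + l - 1
        · rw [if_pos hcell, hcell.1, hcell.2, hLPa]
          by_cases htp : twoPal (PySem.List.pyGetD chars a ' ') (PySem.List.pyGetD chars (a+l-1) ' ') kl = true
          · rw [if_pos htp, if_pos htp]
            by_cases hl2' : l = 2
            · rw [if_pos hl2', LP_gt chars kl (by omega)]
              omega
            · rw [if_neg hl2',
                hyp (a+1) (a+l-1-1) (by omega) (by omega) (by omega) (Or.inl (by omega))]
          · rw [if_neg htp, if_neg htp,
              hyp a (a+l-1-1) (by omega) (by omega) (by omega) (Or.inl (by omega)),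
              hyp (a+1) (a+l-1) (by omega) (by omega) (by omega) (Or.inl (by omega)),
              max_comm]
        · rw [if_neg hcell]
          rcases hcond with hc | ⟨hc, hia⟩
          · exact hyp i j hi0 hij hjm' (Or.inl hc)
          · by_cases hia' : i = a
            · exfalso; exact hcell ⟨hia', by omega⟩
            · exact hyp i j hi0 hij hjm' (Or.inr ⟨hc, by omega⟩)
      exact ih (a+1) (by omega) (by omega) (stepA chars kl l mat a) hshape' hyp'

theorem outer_fold (chars : List Char) (kl : List String) (m : Int) (n : Nat)
    (hn : (n : Int) = m) :
    ∀ k : Nat, ∀ l0 : Int, 2 ≤ l0 → l0 ≤ m + 1 → (m + 1 - l0).toNat ≤ k → ∀ mat, Shape mat n →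
    (∀ i j : Int, 0 ≤ i → i ≤ j → j < m → j - i + 1 ≤ l0 - 1 →
        matG mat i j = LP chars kl i j) →
    (∀ i j : Int, 0 ≤ i → i ≤ j → j < m →
        matG ((PySem.List.pyRange l0 (m+1) 1).foldl (outerA chars kl m) mat) i j
          = LP chars kl i j) := by
  intro k
  induction k with
  | zero =>
    intro l0 hl2 hlm hfuel mat hsh hyp i j hi0 hij hjm
    have hstop : m + 1 ≤ l0 := by omega
    rw [PySem.List.pyRange_one_eq_nil hstop]
    exact hyp i j hi0 hij hjm (by omega)
  | succ k ih =>
    intro l0 hl2 hlm hfuel mat hsh hyp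
    by_cases hstop : m + 1 ≤ l0
    · rw [PySem.List.pyRange_one_eq_nil hstop]
      intro i j hi0 hij hjm
      exact hyp i j hi0 hij hjm (by omega)
    · rw [PySem.List.pyRange_one_cons (by omega), List.foldl_cons]
      have hinner := inner_fold chars kl m l0 n hn hl2 (by omega) (m - l0 + 1).toNat 0 (by omega)
        (by omega) mat hsh
        (fun i j hi0 hij hjm hc => by
          rcases hc with hc | ⟨_, hc⟩
          · exact hyp i j hi0 hij hjm hc
          · omega)
      exact ih (l0 + 1) (by omega) (by omega) (by omega) _ hinner.1
        (fun i j hi0 hij hjm hc => hinner.2 i j hi0 hij hjm (by omega))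

theorem longest_pal_spec : Claim_equal_longest_pal := by
  intro a m k_list _ hpre
  unfold Spec_longest_pal
  have hm : 1 ≤ m := by rcases hpre with h | h <;> omega
  have hmn : (m.toNat : Int) = m := Int.toNat_of_nonneg (by omega)
  rw [alt_eq_LP a m k_list hm]
  show PySem.List.pyGetD (PySem.List.pyGetD
      ((PySem.List.pyRange 2 (m+1) 1).foldl (outerA a.toList k_list m)
        ((PySem.List.pyRange 0 m 1).foldl (fun mat x => matU mat x x 1)
          ((PySem.List.pyRange 0 m 1).map
            (fun _ => (PySem.List.pyRange 0 m 1).map (fun _ => (0:Int)))))) 0 []) (m-1) 0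
    = LP a.toList k_list 0 (m-1)
  have hsh0 : Shape ((PySem.List.pyRange 0 m 1).map
      (fun _ => (PySem.List.pyRange 0 m 1).map (fun _ => (0:Int)))) m.toNat := by
    constructor
    · rw [List.length_map, PySem.List.length_pyRange_one]; omega
    · intro r hr
      rcases List.mem_map.mp hr with ⟨x, _, rfl⟩
      rw [List.length_map, PySem.List.length_pyRange_one]; omega
  obtain ⟨hsh1, hdval⟩ := diag_fold m.toNat (PySem.List.pyRange 0 m 1) _ hsh0
    (fun x hx => by rw [PySem.List.mem_pyRange_one] at hx; omega)
  have hyp1 : ∀ i j : Int, 0 ≤ i → i ≤ j → j < m → j - i + 1 ≤ 2 - 1 →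
      matG ((PySem.List.pyRange 0 m 1).foldl (fun mat x => matU mat x x 1)
        ((PySem.List.pyRange 0 m 1).map
          (fun _ => (PySem.List.pyRange 0 m 1).map (fun _ => (0:Int))))) i j
        = LP a.toList k_list i j := by
    intro i j hi0 hij hjm hlen
    have hij' : i = j := by omega
    rw [hdval i j hi0 (by omega) (by omega) (by omega),
      if_pos ⟨hij', PySem.List.mem_pyRange_one.mpr (by omega)⟩,
      LP_diag a.toList k_list (by omega) hij']
  have hfin := outer_fold a.toList k_list m m.toNat hmn (m + 1 - 2).toNat 2 (by omega)
    (by omega) (by omega) _ hsh1 hyp1 0 (m-1) (by omega) (by omega) (by omega)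
  exact hfin
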